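-- pv_equiv track=rewrite | github.com/Ravali-Tallapelly/DSA-Gfg | Difficulty: Medium/Special Keyboard/special-keyboard.py | optimalKeys
-- ===== SOURCE A (Python) =====
-- def optimalKeys(N):
--     if N<=6:
--         return N
--     dp=[0]*(N+1)
--     for i in range(7):
--         dp[i]=i
--
--     for i in range(7,N+1):
--         dp[i]=0
--         for j in range(i-3,0,-1):
--             curr_val=dp[j]*(i-j-1)
--             dp[i]=max(dp[i],curr_val)
--     return dp[N]
-- ===== SOURCE B (Python) =====
-- def optimalKeys(N):
--     # Closed form: for N >= 11 the optimal sequence multiplies by 4 every 5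
--     # keystrokes on top of one of five base values; small N are table lookups.
--     if N <= 6:
--         return N
--     if N <= 10:
--         return (9, 12, 16, 20)[N - 7]
--     k, r = divmod(N - 11, 5)
--     return (27, 36, 48, 64, 81)[r] * 4 ** k
-- ===== Notes on version B (the rewrite author's own statement) =====
-- stated objective: faster
-- what changed: Replaces the quadratic DP table (full inner rescan per keystroke count) with a closed form: lookup tables for N<=10 and base*4^((N-11)//5) beyond, justified by the period-5 structure of the optimum.
import Mathlib
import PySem

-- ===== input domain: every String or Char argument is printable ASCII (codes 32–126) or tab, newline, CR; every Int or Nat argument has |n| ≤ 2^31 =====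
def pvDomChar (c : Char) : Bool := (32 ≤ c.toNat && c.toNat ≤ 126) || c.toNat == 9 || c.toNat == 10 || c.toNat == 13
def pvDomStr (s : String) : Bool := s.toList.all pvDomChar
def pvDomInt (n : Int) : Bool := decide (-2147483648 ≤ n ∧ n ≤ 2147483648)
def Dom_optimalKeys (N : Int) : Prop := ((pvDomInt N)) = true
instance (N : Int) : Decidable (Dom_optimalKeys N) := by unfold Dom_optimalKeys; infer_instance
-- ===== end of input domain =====

-- B replaces A's quadratic DP over all previous positions by a closed form (lookup tables
-- plus base * 4^((N-11)//5)); proved to return the same value for every N.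

-- ===== PORT A =====
def optimalKeys (N : Int) : Int :=
  if N ≤ 6 then N
  else
    let dp0 : List Int := List.replicate (N + 1).toNat 0
    let dp1 := (PySem.List.pyRange 0 7 1).foldl (fun d i => PySem.List.pySetD d i i) dp0
    let dp2 := (PySem.List.pyRange 7 (N + 1) 1).foldl (fun d i =>
        let d1 := PySem.List.pySetD d i 0
        (PySem.List.pyRange (i - 3) 0 (-1)).foldl (fun d2 j =>
            let currVal := (PySem.List.pyGetD d2 j 0) * (i - j - 1)
            PySem.List.pySetD d2 i (max (PySem.List.pyGetD d2 i 0) currVal)) d1) dp1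
    PySem.List.pyGetD dp2 N 0

-- ===== PORT B =====
def optimalKeys_alt (N : Int) : Int :=
  if N ≤ 6 then N
  else if N ≤ 10 then PySem.List.pyGetD [9, 12, 16, 20] (N - 7) 0
  else
    let k := PySem.Int.floordiv (N - 11) 5
    let r := PySem.Int.mod (N - 11) 5
    (PySem.List.pyGetD [27, 36, 48, 64, 81] r 0) * 4 ^ k.toNat

-- ===== PRECONDITION & SPEC =====
def Spec_optimalKeys (N : Int) (out : Int) : Prop := out = optimalKeys_alt N
instance (N : Int) (out : Int) : Decidable (Spec_optimalKeys N out) := by unfold Spec_optimalKeys; infer_instance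

-- ===== CLAIM (what is proved, stated in full; the proofs are below) =====
def Claim_equal_optimalKeys : Prop := ∀ (N : Int), Dom_optimalKeys N → Spec_optimalKeys N (optimalKeys N)

-- ===== LEMMAS AND PROOFS =====

-- The closed form on ℕ that both ports are reduced to.
def pvF (n : ℕ) : ℤ :=
  if n ≤ 6 then n
  else if n ≤ 10 then [9, 12, 16, 20].getD (n - 7) 0
  else [27, 36, 48, 64, 81].getD ((n - 11) % 5) 0 * 4 ^ ((n - 11) / 5)

theorem pvF_nonneg (n : ℕ) : 0 ≤ pvF n := by
  unfold pvF
  split_ifs with h1 h2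
  · positivity
  · have : n - 7 < 4 := by omega
    interval_cases h : (n - 7) <;> decide
  · have h5 : (n - 11) % 5 < 5 := by omega
    have : (0:ℤ) ≤ 4 ^ ((n - 11) / 5) := by positivity
    interval_cases h : ((n - 11) % 5) <;> simp

theorem pvF_period (n : ℕ) (h : 11 ≤ n) : pvF (n + 5) = 4 * pvF n := by
  unfold pvF
  have h1 : ¬ n + 5 ≤ 6 := by omega
  have h2 : ¬ n + 5 ≤ 10 := by omega
  have h3 : ¬ n ≤ 6 := by omega
  have h4 : ¬ n ≤ 10 := by omega
  rw [if_neg h1, if_neg h2, if_neg h3, if_neg h4]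
  have e1 : (n + 5 - 11) % 5 = (n - 11) % 5 := by omega
  have e2 : (n + 5 - 11) / 5 = (n - 11) / 5 + 1 := by omega
  rw [e1, e2, pow_succ]
  ring

theorem pvF_mul4_le (n : ℕ) : 4 * pvF n ≤ pvF (n + 5) := by
  by_cases h : 11 ≤ n
  · rw [pvF_period n h]
  · interval_cases n <;> decide

theorem pvF_step_le (k : ℕ) (hk2 : 2 ≤ k) (hk6 : k ≤ 6) (j : ℕ) : pvF j * k ≤ pvF (j + k + 1) := by
  induction j using Nat.strong_induction_on with
  | _ j ih =>
    by_cases hj : j ≤ 15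
    · interval_cases j <;> interval_cases k <;> decide
    · have h5 : j - 5 + 5 = j := by omega
      have e1 : pvF j = 4 * pvF (j - 5) := by
        rw [← pvF_period (j - 5) (by omega), h5]
      have e2 : pvF (j + k + 1) = 4 * pvF (j - 5 + k + 1) := by
        rw [← pvF_period (j - 5 + k + 1) (by omega)]
        congr 1; omega
      rw [e1, e2]
      have := ih (j - 5) (by omega)
      nlinarith [this]

theorem pvF_dom (j k : ℕ) (hk : 2 ≤ k) : pvF j * k ≤ pvF (j + k + 1) := by
  induction k using Nat.strong_induction_on generalizing j with
  | _ k ih =>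
    by_cases hk6 : k ≤ 6
    · exact pvF_step_le k hk hk6 j
    · have h1 : pvF j * k ≤ (4 * pvF j) * ((k : ℤ) - 5) := by
        nlinarith [pvF_nonneg j]
      have h2 : (4 * pvF j) * ((k:ℤ) - 5) ≤ pvF (j + 5) * ((k:ℤ) - 5) := by
        have := pvF_mul4_le j
        nlinarith [this]
      have h3 : pvF (j + 5) * ((k - 5 : ℕ) : ℤ) ≤ pvF ((j + 5) + (k - 5) + 1) :=
        ih (k - 5) (by omega) (j + 5) (by omega)
      have e : ((k - 5 : ℕ) : ℤ) = (k : ℤ) - 5 := by omega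
      have e2 : (j + 5) + (k - 5) + 1 = j + k + 1 := by omega
      rw [e] at h3; rw [e2] at h3
      linarith

theorem pvF_attain (i : ℕ) (h : 7 ≤ i) :
    ∃ j k : ℕ, 1 ≤ j ∧ 2 ≤ k ∧ j + k + 1 = i ∧ pvF j * k = pvF i := by
  by_cases hi : i ≤ 15
  · interval_cases i
    · exact ⟨3, 3, by norm_num, by norm_num, by norm_num, by decide⟩
    · exact ⟨4, 3, by norm_num, by norm_num, by norm_num, by decide⟩
    · exact ⟨4, 4, by norm_num, by norm_num, by norm_num, by decide⟩
    · exact ⟨5, 4, by norm_num, by norm_num, by norm_num, by decide⟩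
    · exact ⟨7, 3, by norm_num, by norm_num, by norm_num, by decide⟩
    · exact ⟨8, 3, by norm_num, by norm_num, by norm_num, by decide⟩
    · exact ⟨8, 4, by norm_num, by norm_num, by norm_num, by decide⟩
    · exact ⟨9, 4, by norm_num, by norm_num, by norm_num, by decide⟩
    · exact ⟨11, 3, by norm_num, by norm_num, by norm_num, by decide⟩
  · refine ⟨i - 5, 4, by omega, by omega, by omega, ?_⟩
    have := pvF_period (i - 5) (by omega)
    have e : i - 5 + 5 = i := by omega
    rw [e] at this
    rw [this]; push_cast; ring

theorem alt_eq_pvF (N : Int) (h : 0 ≤ N) : optimalKeys_alt N = pvF N.toNat := by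
  obtain ⟨n, rfl⟩ := Int.eq_ofNat_of_zero_le h
  unfold optimalKeys_alt pvF
  simp only [Int.toNat_natCast]
  by_cases h1 : n ≤ 6
  · rw [if_pos (by exact_mod_cast h1), if_pos h1]
  · rw [if_neg (by exact_mod_cast h1), if_neg h1]
    by_cases h2 : n ≤ 10
    · rw [if_pos (by exact_mod_cast h2), if_pos h2]
      have e : (n : ℤ) - 7 = ((n - 7 : ℕ) : ℤ) := by omega
      rw [e, PySem.List.pyGetD_natCast]
    · rw [if_neg (by exact_mod_cast h2), if_neg h2]
      have e : (n : ℤ) - 11 = ((n - 11 : ℕ) : ℤ) := by omega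
      have e5 : (5 : ℤ) = ((5:ℕ) : ℤ) := by norm_num
      rw [e, e5, PySem.Int.floordiv_natCast, PySem.Int.mod_natCast, PySem.List.pyGetD_natCast]
      simp
      left; omega

theorem pv_getD_set_ne (xs : List ℤ) (n : ℕ) (v : ℤ) (m : ℕ) (h : m ≠ n) :
    (xs.set n v).getD m 0 = xs.getD m 0 := by
  simp [List.getD_eq_getElem?_getD, List.getElem?_set_ne (Ne.symm h)]

theorem pv_getD_set_self (xs : List ℤ) (n : ℕ) (v : ℤ) (h : n < xs.length) :
    (xs.set n v).getD n 0 = v := by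
  simp [List.getD_eq_getElem?_getD, h]

theorem pv_foldl_max_le (t : List ℤ) (a B : ℤ) (ha : a ≤ B) (h : ∀ y ∈ t, y ≤ B) :
    t.foldl max a ≤ B := by
  induction t generalizing a with
  | nil => simpa
  | cons x xs ih =>
    simp only [List.foldl_cons]
    exact ih (max a x) (max_le ha (h x (by simp))) (fun y hy => h y (by simp [hy]))

theorem pv_inner_fold (i : ℤ) (hi0 : 0 ≤ i) (js : List ℤ) (hjs : ∀ j ∈ js, 0 ≤ j ∧ j < i)
    (d : List ℤ) (hlen : i.toNat < d.length) :
    (js.foldl (fun d2 j =>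
        let currVal := (PySem.List.pyGetD d2 j 0) * (i - j - 1)
        PySem.List.pySetD d2 i (max (PySem.List.pyGetD d2 i 0) currVal)) d).length = d.length ∧
    (∀ m : ℕ, m ≠ i.toNat → (js.foldl (fun d2 j =>
        let currVal := (PySem.List.pyGetD d2 j 0) * (i - j - 1)
        PySem.List.pySetD d2 i (max (PySem.List.pyGetD d2 i 0) currVal)) d).getD m 0 = d.getD m 0) ∧
    (js.foldl (fun d2 j =>
        let currVal := (PySem.List.pyGetD d2 j 0) * (i - j - 1)
        PySem.List.pySetD d2 i (max (PySem.List.pyGetD d2 i 0) currVal)) d).getD i.toNat 0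
      = (js.map (fun j => d.getD j.toNat 0 * (i - j - 1))).foldl max (d.getD i.toNat 0) := by
  induction js generalizing d with
  | nil => exact ⟨rfl, fun _ _ => rfl, rfl⟩
  | cons j js ih =>
    obtain ⟨hj0, hji⟩ := hjs j (by simp)
    have hjne : j.toNat ≠ i.toNat := by omega
    have hstep : (fun d2 j =>
        let currVal := (PySem.List.pyGetD d2 j 0) * (i - j - 1)
        PySem.List.pySetD d2 i (max (PySem.List.pyGetD d2 i 0) currVal)) d j
        = d.set i.toNat (max (d.getD i.toNat 0) (d.getD j.toNat 0 * (i - j - 1))) := by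
      simp only [PySem.List.pySetD_of_nonneg _ _ hi0, PySem.List.pyGetD_of_nonneg _ _ hi0,
        PySem.List.pyGetD_of_nonneg _ _ hj0]
    set d' := d.set i.toNat (max (d.getD i.toNat 0) (d.getD j.toNat 0 * (i - j - 1))) with hd'
    have hlen' : i.toNat < d'.length := by simpa [hd'] using hlen
    have h1 := ih (fun x hx => hjs x (by simp [hx])) d' hlen'
    simp only [List.foldl_cons, hstep]
    refine ⟨by rw [h1.1]; simp [hd'], fun m hm => ?_, ?_⟩
    · rw [h1.2.1 m hm, hd', pv_getD_set_ne _ _ _ _ hm]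
    · rw [h1.2.2, List.map_cons, List.foldl_cons]
      have e1 : d'.getD i.toNat 0 = max (d.getD i.toNat 0) (d.getD j.toNat 0 * (i - j - 1)) :=
        pv_getD_set_self _ _ _ hlen
      have e2 : (js.map (fun x => d'.getD x.toNat 0 * (i - x - 1)))
          = js.map (fun x => d.getD x.toNat 0 * (i - x - 1)) := by
        apply List.map_congr_left
        intro x hx
        have hx' := hjs x (by simp [hx])
        rw [hd', pv_getD_set_ne _ _ _ _ (by omega)]
      rw [e1, e2]

theorem pv_inner_max_eq (i : ℤ) (h7 : 7 ≤ i) (d : List ℤ)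
    (hd : ∀ m : ℕ, m < i.toNat → d.getD m 0 = pvF m) :
    ((PySem.List.pyRange (i - 3) 0 (-1)).map (fun j => d.getD j.toNat 0 * (i - j - 1))).foldl
      max 0 = pvF i.toNat := by
  apply le_antisymm
  · apply pv_foldl_max_le _ _ _ (pvF_nonneg _)
    intro y hy
    obtain ⟨j, hjmem, rfl⟩ := List.mem_map.1 hy
    obtain ⟨hj0, hji⟩ := PySem.List.mem_pyRange_neg_one.1 hjmem
    have hk2 : 2 ≤ (i - j - 1).toNat := by omega
    have e : j.toNat + (i - j - 1).toNat + 1 = i.toNat := by omega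
    have := pvF_dom j.toNat (i - j - 1).toNat hk2
    rw [e] at this
    rw [hd j.toNat (by omega)]
    calc pvF j.toNat * (i - j - 1) = pvF j.toNat * ((i - j - 1).toNat : ℤ) := by
          congr 1; omega
      _ ≤ pvF i.toNat := this
  · obtain ⟨j, k, hj1, hk2, hsum, hval⟩ := pvF_attain i.toNat (by omega)
    have hmem : (j : ℤ) ∈ PySem.List.pyRange (i - 3) 0 (-1) := by
      rw [PySem.List.mem_pyRange_neg_one]; constructor <;> [omega; omega]
    have hmem2 : d.getD (j:ℤ).toNat 0 * (i - (j:ℤ) - 1)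
        ∈ (PySem.List.pyRange (i - 3) 0 (-1)).map (fun x => d.getD x.toNat 0 * (i - x - 1)) :=
      List.mem_map_of_mem hmem
    have hle := (PySem.List.le_foldl_max
      ((PySem.List.pyRange (i - 3) 0 (-1)).map (fun x => d.getD x.toNat 0 * (i - x - 1))) 0).2
      _ hmem2
    have e : d.getD (j:ℤ).toNat 0 * (i - (j:ℤ) - 1) = pvF i.toNat := by
      rw [Int.toNat_natCast, hd j (by omega), ← hval]
      congr 1; omega
    rwa [e] at hle

theorem pv_init_fold (L : ℕ) (hL : 8 ≤ L) (m : ℕ) (hm : m < 7) :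
    ((PySem.List.pyRange 0 7 1).foldl (fun d i => PySem.List.pySetD d i i)
      (List.replicate L (0:ℤ))).getD m 0 = pvF m := by
  have hr : PySem.List.pyRange 0 7 1 = [0, 1, 2, 3, 4, 5, 6] := by decide
  rw [hr]
  simp only [List.foldl_cons, List.foldl_nil]
  rw [PySem.List.pySetD_of_nonneg _ _ (by norm_num), PySem.List.pySetD_of_nonneg _ _ (by norm_num),
      PySem.List.pySetD_of_nonneg _ _ (by norm_num), PySem.List.pySetD_of_nonneg _ _ (by norm_num),
      PySem.List.pySetD_of_nonneg _ _ (by norm_num), PySem.List.pySetD_of_nonneg _ _ (by norm_num),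
      PySem.List.pySetD_of_nonneg _ _ (by norm_num)]
  have h0 : 0 < L := by omega
  have h1 : 1 < L := by omega
  have h2 : 2 < L := by omega
  have h3 : 3 < L := by omega
  have h4 : 4 < L := by omega
  have h5 : 5 < L := by omega
  have h6 : 6 < L := by omega
  interval_cases m <;>
    simp [List.getD_eq_getElem?_getD, pvF,
      h0, h1, h2, h3, h4, h5, h6]

theorem pv_init_len (L : ℕ) :
    ((PySem.List.pyRange 0 7 1).foldl (fun d i => PySem.List.pySetD d i i)
      (List.replicate L (0:ℤ))).length = L := by
  have hr : PySem.List.pyRange 0 7 1 = [0, 1, 2, 3, 4, 5, 6] := by decide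
  rw [hr]
  simp [PySem.List.length_pySetD]

theorem pv_outer_fold (N : ℤ) (hN : 7 ≤ N) (d1 : List ℤ) (hlen : d1.length = (N + 1).toNat)
    (hinit : ∀ m : ℕ, m < 7 → d1.getD m 0 = pvF m) (t : ℕ) (h7t : 7 ≤ t)
    (htN : (t : ℤ) ≤ N + 1) :
    ((PySem.List.pyRange 7 (t : ℤ) 1).foldl (fun d i =>
        let d1 := PySem.List.pySetD d i 0
        (PySem.List.pyRange (i - 3) 0 (-1)).foldl (fun d2 j =>
            let currVal := (PySem.List.pyGetD d2 j 0) * (i - j - 1)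
            PySem.List.pySetD d2 i (max (PySem.List.pyGetD d2 i 0) currVal)) d1) d1).length
      = (N + 1).toNat ∧
    ∀ m : ℕ, m < t → ((PySem.List.pyRange 7 (t : ℤ) 1).foldl (fun d i =>
        let d1 := PySem.List.pySetD d i 0
        (PySem.List.pyRange (i - 3) 0 (-1)).foldl (fun d2 j =>
            let currVal := (PySem.List.pyGetD d2 j 0) * (i - j - 1)
            PySem.List.pySetD d2 i (max (PySem.List.pyGetD d2 i 0) currVal)) d1) d1).getD m 0
      = pvF m := by
  induction t with
  | zero => omega
  | succ t ih =>
    by_cases ht7 : 7 ≤ t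
    · -- split off the last iteration i = t
      have hsplit : PySem.List.pyRange 7 ((t + 1 : ℕ) : ℤ) 1
          = PySem.List.pyRange 7 (t : ℤ) 1 ++ [(t : ℤ)] := by
        push_cast
        exact PySem.List.pyRange_one_succ_right (by exact_mod_cast ht7)
      obtain ⟨ihlen, ihval⟩ := ih ht7 (by omega)
      rw [hsplit, List.foldl_append, List.foldl_cons, List.foldl_nil]
      set d := (PySem.List.pyRange 7 (t : ℤ) 1).foldl _ d1 with hd
      -- the iteration body at i = t
      have hi0 : (0 : ℤ) ≤ (t : ℤ) := by omega
      have htt : ((t : ℤ)).toNat = t := by omega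
      have hlen2 : ((t : ℤ)).toNat < d.length := by rw [ihlen, htt]; omega
      have hset : PySem.List.pySetD d (t : ℤ) 0 = d.set ((t : ℤ)).toNat 0 :=
        PySem.List.pySetD_of_nonneg _ _ hi0
      set dset := d.set ((t : ℤ)).toNat 0 with hdset
      have hlenset : ((t : ℤ)).toNat < dset.length := by simpa [hdset] using hlen2
      have hjs : ∀ j ∈ PySem.List.pyRange ((t : ℤ) - 3) 0 (-1), 0 ≤ j ∧ j < (t : ℤ) := by
        intro j hj
        have := PySem.List.mem_pyRange_neg_one.1 hj
        omega
      obtain ⟨flen, fne, fi⟩ := pv_inner_fold (t : ℤ) hi0 _ hjs dset hlenset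
      have hdsetval : ∀ m : ℕ, m < ((t : ℤ)).toNat → dset.getD m 0 = pvF m := by
        intro m hm
        rw [hdset, pv_getD_set_ne _ _ _ _ (by omega)]
        exact ihval m (by omega)
      have hdset_i : dset.getD ((t : ℤ)).toNat 0 = 0 := pv_getD_set_self _ _ _ hlen2
      have hmax := pv_inner_max_eq (t : ℤ) (by exact_mod_cast ht7) dset hdsetval
      constructor
      · rw [hset, flen]; simp [hdset, ihlen]
      · intro m hm
        rw [hset]
        by_cases hmi : m = ((t : ℤ)).toNat
        · rw [hmi, fi, hdset_i, hmax, htt]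
        · rw [fne m hmi, hdsetval m (by omega)]
    · -- t + 1 = 7 : empty range
      have ht : t = 6 := by omega
      subst ht
      have : PySem.List.pyRange 7 ((7 : ℕ) : ℤ) 1 = [] := by decide
      rw [this, List.foldl_nil]
      exact ⟨hlen, fun m hm => hinit m hm⟩

theorem pv_A_eq_pvF (N : ℤ) (hN : 7 ≤ N) : optimalKeys N = pvF N.toNat := by
  unfold optimalKeys
  rw [if_neg (by omega)]
  dsimp only
  have hinit := pv_init_fold (N + 1).toNat (by omega)
  have hlen := pv_init_len (N + 1).toNat
  have h := pv_outer_fold N hN _ hlen hinit (N + 1).toNat (by omega) (by omega)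
  have e : (((N + 1).toNat : ℕ) : ℤ) = N + 1 := by omega
  rw [e] at h
  rw [PySem.List.pyGetD_of_nonneg _ _ (by omega : (0:ℤ) ≤ N)]
  exact h.2 N.toNat (by omega)


-- ===== VERDICT (by name: the statement is the Claim_ definition above) =====
theorem optimalKeys_spec : Claim_equal_optimalKeys := by
  intro N _
  unfold Spec_optimalKeys
  by_cases h : N ≤ 6
  · unfold optimalKeys optimalKeys_alt
    rw [if_pos h, if_pos h]
  · rw [pv_A_eq_pvF N (by omega), alt_eq_pvF N (by omega)]
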